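-- pv_equiv track=rewrite | github.com/tyler-hoffman/aoc-2024 | aoc_2024/day_22/b.py | get_first_changes_and_nanners
-- ===== SOURCE A (Python) =====
-- def get_first_changes_and_nanners(
--     changes_and_nanners: list[tuple[tuple[int, ...], int]]
-- ) -> dict[tuple[int, ...], int]:
--     output: dict[tuple[int, ...], int] = {}
--     for changes, nanners in changes_and_nanners:
--         if changes not in output:
--             output[changes] = nanners
--     return output
-- ===== SOURCE B (Python) =====
-- def get_first_changes_and_nanners(
--     changes_and_nanners: list[tuple[tuple[int, ...], int]]
-- ) -> dict[tuple[int, ...], int]: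
--     # In a dict built from the reversed pairs the last assignment wins,
--     # i.e. the FIRST occurrence of each key in the original order.
--     first_values = dict(reversed(changes_and_nanners))
--     # Re-emit the keys in first-seen order (duplicates overwrite with the
--     # same value and keep their original position).
--     return {changes: first_values[changes] for changes, _ in changes_and_nanners}
-- ===== Notes on version B (the rewrite author's own statement) =====
-- stated objective: idiomatic
-- what changed: Replaces the forward guarded single pass by the standard two-pass idiom: dict(reversed(pairs)) so the first occurrence's value wins, then a dict comprehension over the forward order to fix key order; no membership test remains.
import Mathlib
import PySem

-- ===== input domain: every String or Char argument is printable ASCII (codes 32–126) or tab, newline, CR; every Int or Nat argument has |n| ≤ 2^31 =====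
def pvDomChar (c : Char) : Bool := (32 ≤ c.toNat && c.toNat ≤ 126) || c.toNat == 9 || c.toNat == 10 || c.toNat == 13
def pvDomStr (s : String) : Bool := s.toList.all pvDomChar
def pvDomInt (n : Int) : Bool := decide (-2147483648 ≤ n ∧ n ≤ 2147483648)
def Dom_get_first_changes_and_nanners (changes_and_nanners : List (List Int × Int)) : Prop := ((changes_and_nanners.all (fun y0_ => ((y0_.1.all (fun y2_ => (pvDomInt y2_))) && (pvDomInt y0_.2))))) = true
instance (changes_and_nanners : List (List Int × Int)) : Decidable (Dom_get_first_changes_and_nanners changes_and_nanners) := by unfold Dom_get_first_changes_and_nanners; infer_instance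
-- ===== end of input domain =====

-- B replaces A's guarded forward pass by the two-pass idiom: a dict of the reversed pairs (last
-- assignment wins = first occurrence's value), then a forward comprehension fixing the key order;
-- objective: idiomatic, same result and cost.

-- ===== PORT A =====
def get_first_changes_and_nanners (changes_and_nanners : List (List Int × Int)) : List (List Int × Int) :=
  (changes_and_nanners.foldl
    (fun output p => if output.contains p.1 then output else output.insert p.1 p.2)
    (PySem.Dict.empty : PySem.Dict (List Int) Int)).items

-- ===== PORT B =====
-- first_values[changes] in Source B: the key is always present (it is drawn from the same list),
-- so getD's default is never reached — exact.
def get_first_changes_and_nanners_alt (changes_and_nanners : List (List Int × Int)) : List (List Int × Int) :=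
  let first_values : PySem.Dict (List Int) Int :=
    changes_and_nanners.reverse.foldl (fun d p => d.insert p.1 p.2) PySem.Dict.empty
  (changes_and_nanners.foldl
    (fun d p => d.insert p.1 (first_values.getD p.1 0)) PySem.Dict.empty).items

-- ===== PRECONDITION & SPEC =====
def Spec_get_first_changes_and_nanners (changes_and_nanners : List (List Int × Int)) (out : List (List Int × Int)) : Prop := out = get_first_changes_and_nanners_alt changes_and_nanners
instance (changes_and_nanners : List (List Int × Int)) (out : List (List Int × Int)) : Decidable (Spec_get_first_changes_and_nanners changes_and_nanners out) := by unfold Spec_get_first_changes_and_nanners; infer_instance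

-- ===== CLAIM (what is proved, stated in full; the proofs are below) =====
def Claim_equal_get_first_changes_and_nanners : Prop := ∀ (changes_and_nanners : List (List Int × Int)), Dom_get_first_changes_and_nanners changes_and_nanners → Spec_get_first_changes_and_nanners changes_and_nanners (get_first_changes_and_nanners changes_and_nanners)

-- ===== LEMMAS AND PROOFS =====

-- the first-occurrence pair list both programs compute
def pvFirst : List (List Int × Int) → List (List Int × Int)
  | [] => []
  | p :: r => p :: (pvFirst r).filter (fun q => q.1 != p.1)

-- A's fold, relative to pvFirst
theorem pvFoldA (l : List (List Int × Int)) (d : PySem.Dict (List Int) Int) :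
    (l.foldl (fun d p => if d.contains p.1 then d else d.insert p.1 p.2) d).items
      = d.items ++ (pvFirst l).filter (fun q => !(d.contains q.1)) := by
  induction l generalizing d with
  | nil => simp [pvFirst]
  | cons p r ih =>
    rcases p with ⟨c, n⟩
    by_cases h : d.contains c = true
    · simp only [List.foldl_cons, h, if_true, ih, pvFirst]
      rw [List.filter_cons]
      simp only [h, Bool.not_true]
      rw [List.filter_filter]
      congr 1
      apply List.filter_congr
      intro q _
      by_cases hq : q.1 = c
      · simp [hq, h]
      · simp [hq]
    · rw [Bool.not_eq_true] at h
      simp only [List.foldl_cons, h, Bool.false_eq_true, if_false]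
      rw [ih]
      rw [PySem.Dict.items_insert_of_not_contains (h := h)]
      simp only [pvFirst, List.filter_cons]
      simp only [h, Bool.not_false, List.append_assoc, List.singleton_append]
      rw [List.filter_filter]
      congr 2
      apply List.filter_congr
      intro q _
      rw [PySem.Dict.contains_insert]
      by_cases hq : q.1 = c
      · simp [hq]
      · simp [bne, Bool.and_comm]

-- B's second fold, relative to pvFirst, for ANY value function fv,
-- provided every entry already stored agrees with fv
theorem pvFoldB (fv : List Int → Int) (l : List (List Int × Int)) (d : PySem.Dict (List Int) Int)
    (hd : ∀ q ∈ d.items, q.2 = fv q.1) :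
    (l.foldl (fun d p => d.insert p.1 (fv p.1)) d).items
      = d.items ++ ((pvFirst l).filter (fun q => !(d.contains q.1))).map (fun q => (q.1, fv q.1)) := by
  induction l generalizing d with
  | nil => simp [pvFirst]
  | cons p r ih =>
    rcases p with ⟨c, n⟩
    by_cases h : d.contains c = true
    · have hid : d.insert c (fv c) = d := by
        apply PySem.Dict.ext
        rw [PySem.Dict.items_insert_of_contains (h := h)]
        rw [show d.items.map (fun q => if q.1 == c then (c, fv c) else q) = d.items.map id from
          List.map_congr_left (by
            intro q hq
            by_cases hqc : q.1 = c
            · have hv : q.2 = fv q.1 := hd q hq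
              simp [hqc, hv, Prod.ext_iff]
            · simp [hqc]), List.map_id]
      simp only [List.foldl_cons, hid, ih d hd, pvFirst]
      rw [List.filter_cons]
      simp only [h, Bool.not_true]
      rw [List.filter_filter]
      congr 2
      apply List.filter_congr
      intro q _
      by_cases hq : q.1 = c
      · simp [hq, h]
      · simp [hq]
    · rw [Bool.not_eq_true] at h
      simp only [List.foldl_cons]
      have hd' : ∀ q ∈ (d.insert c (fv c)).items, q.2 = fv q.1 := by
        intro q hq
        rcases (PySem.Dict.mem_items_insert _ _ _ _).mp hq with hq | ⟨hq, _⟩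
        · simp [hq]
        · exact hd q hq
      rw [ih _ hd']
      rw [PySem.Dict.items_insert_of_not_contains (h := h)]
      simp only [pvFirst, List.filter_cons]
      simp only [h, Bool.not_false, List.append_assoc, List.singleton_append]
      rw [List.filter_filter]
      congr 3
      apply List.filter_congr
      intro q _
      rw [PySem.Dict.contains_insert]
      by_cases hq : q.1 = c
      · simp [hq]
      · simp [bne, Bool.and_comm]

-- the reversed-insert dict looks up the FIRST occurrence's value
theorem pvFindRev (l : List (List Int × Int)) (k : List Int) :
    (l.reverse.foldl (fun d p => d.insert p.1 p.2)
        (PySem.Dict.empty : PySem.Dict (List Int) Int)).get? k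
      = (l.find? (fun p => p.1 == k)).map (·.2) := by
  rw [List.foldl_reverse]
  induction l with
  | nil => simp [PySem.Dict.get?_empty]
  | cons p r ih =>
    simp only [List.foldr_cons, List.find?_cons]
    by_cases h : p.1 = k
    · simp [h, PySem.Dict.get?_insert_self]
    · have hbe : (p.1 == k) = false := by simp [h]
      rw [PySem.Dict.get?_insert_of_ne (hne := fun hk => h (Eq.symm hk))]
      simp [hbe, ih]

-- members of pvFirst l ARE first occurrences
theorem pvFirst_find (l : List (List Int × Int)) (q : List Int × Int) (hq : q ∈ pvFirst l) :
    l.find? (fun p => p.1 == q.1) = some q := by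
  induction l with
  | nil => simp [pvFirst] at hq
  | cons p r ih =>
    simp only [pvFirst, List.mem_cons] at hq
    rcases hq with hq | hq
    · subst hq
      simp
    · have hne : q.1 ≠ p.1 := by
        have := List.of_mem_filter hq
        simpa [bne] using this
      have hq' := List.mem_of_mem_filter hq
      rw [List.find?_cons]
      have hne' : (p.1 == q.1) = false := by
        simpa using fun h => hne (Eq.symm h)
      simp [hne', ih hq']

-- ===== VERDICT (by name: the statement is the Claim_ definition above) =====
theorem get_first_changes_and_nanners_spec : Claim_equal_get_first_changes_and_nanners := by
  intro l _
  unfold Spec_get_first_changes_and_nanners get_first_changes_and_nanners get_first_changes_and_nanners_alt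
  rw [pvFoldA, pvFoldB (fun k =>
      ((l.reverse.foldl (fun d p => d.insert p.1 p.2)
          (PySem.Dict.empty : PySem.Dict (List Int) Int)).getD k 0)) l PySem.Dict.empty
      (by intro q hq; simp [PySem.Dict.empty] at hq)]
  simp only [PySem.Dict.contains_empty, Bool.not_false, List.filter_true]
  rw [show ((pvFirst l).map (fun q =>
        (q.1, (l.reverse.foldl (fun d p => d.insert p.1 p.2)
          (PySem.Dict.empty : PySem.Dict (List Int) Int)).getD q.1 0)))
      = (pvFirst l).map id from
    List.map_congr_left (by
      intro q hq
      have hfind := pvFirst_find l q hq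
      have hget := pvFindRev l q.1
      rw [hfind, List.foldl_reverse] at hget
      simp [PySem.Dict.getD_eq_get?_getD, hget]), List.map_id]
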